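-- pv_equiv track=rewrite | github.com/Najoj/advent-of-code | 2025/2/2.py | get_valid
-- ===== SOURCE A (Python) =====
-- import textwrap
--
-- def split(s, n):
--     return textwrap.wrap(s, n)
--
-- def get_valid(from_, to_):
--     for x in range(from_, to_ + 1):
--         x_str = str(x)
--         l = int(len(x_str) / 2)
--         for n in range(1, l + 2):
--             splits = split(str(x), n)
--             if len(splits) > 1 and all(splits[0] == y for y in splits[1:]):
--                 yield x
--                 break
-- ===== SOURCE B (Python) =====
-- def get_valid(from_, to_):
--     for x in range(from_, to_ + 1):
--         s = str(x)
--         if s in (s + s)[1:-1]: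
--             yield x
-- ===== Notes on version B (the rewrite author's own statement) =====
-- stated objective: idiomatic
-- what changed: Replaces the inner block-length loop over textwrap.wrap chunk lists with the standard string-periodicity idiom s in (s+s)[1:-1], a single substring test per number.
import Mathlib
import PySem

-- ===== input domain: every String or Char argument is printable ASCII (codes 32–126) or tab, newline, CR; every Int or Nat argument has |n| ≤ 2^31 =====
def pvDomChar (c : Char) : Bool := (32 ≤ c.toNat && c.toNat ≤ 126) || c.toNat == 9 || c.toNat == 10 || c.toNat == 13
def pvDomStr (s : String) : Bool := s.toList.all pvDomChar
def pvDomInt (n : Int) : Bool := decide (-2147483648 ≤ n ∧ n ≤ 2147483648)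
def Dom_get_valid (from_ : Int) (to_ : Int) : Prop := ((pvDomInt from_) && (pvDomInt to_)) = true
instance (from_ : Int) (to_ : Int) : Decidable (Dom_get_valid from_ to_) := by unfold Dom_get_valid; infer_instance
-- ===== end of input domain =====

-- B replaces A's inner block-length loop over textwrap.wrap chunk lists with the
-- string-periodicity idiom  s in (s+s)[1:-1]  (one substring test per number); objective: idiomatic.
-- ===== PORT A =====
-- textwrap.wrap(s, n): for the strings A feeds it (digits with an optional leading '-',
-- no whitespace, no hyphen preceded by a word character) it is exactly chunking into
-- pieces of n characters; ported as that chunking (exact on those inputs; width 0 never occurs).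
def chunkWrap : Nat → List Char → List (List Char)
  | _, [] => []
  | 0, s => [s]          -- unreachable: A always calls with width n ≥ 1
  | d+1, c :: cs => List.take (d+1) (c :: cs) :: chunkWrap (d+1) (List.drop (d+1) (c :: cs))
termination_by _ s => s.length
decreasing_by simp

def get_valid (from_ : Int) (to_ : Int) : List Int :=
  (PySem.List.pyRange from_ (to_ + 1)).foldl (fun acc x =>
    let x_str := PySem.Int.toChars x
    -- l = int(len(x_str) / 2): exact as Nat division (len ≥ 0, len < 2^52)
    let l : Nat := x_str.length / 2
    -- the inner 'for n … yield x; break' loop: x is collected iff some n succeeds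
    if (PySem.List.pyRange 1 ((l : Int) + 2)).any (fun n =>
        let splits := chunkWrap n.toNat (PySem.Int.toChars x)
        decide (1 < splits.length) &&
          (PySem.List.slice splits (some 1) none).all (fun y => y == splits.headD []))
    then acc ++ [x] else acc) []

-- ===== PORT B =====
def get_valid_alt (from_ : Int) (to_ : Int) : List Int :=
  (PySem.List.pyRange from_ (to_ + 1)).foldl (fun acc x =>
    let s := PySem.Int.toChars x
    if PySem.Chars.isIn s (PySem.List.slice (s ++ s) (some 1) (some (-1)))
    then acc ++ [x] else acc) []

-- ===== PRECONDITION & SPEC =====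
def Spec_get_valid (from_ : Int) (to_ : Int) (out : List Int) : Prop := out = get_valid_alt from_ to_
instance (from_ : Int) (to_ : Int) (out : List Int) : Decidable (Spec_get_valid from_ to_ out) := by unfold Spec_get_valid; infer_instance

-- ===== CLAIM (what is proved, stated in full; the proofs are below) =====
def Claim_equal_get_valid : Prop := ∀ (from_ : Int) (to_ : Int), Dom_get_valid from_ to_ → Spec_get_valid from_ to_ (get_valid from_ to_)

-- ===== LEMMAS AND PROOFS =====

-- s consists of (s.length / d) repetitions of its first d characters, a proper block
def isRep (s : List Char) (d : Nat) : Prop :=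
  0 < d ∧ d < s.length ∧ d ∣ s.length ∧ s = (List.replicate (s.length / d) (s.take d)).flatten

theorem flatten_replicate_length (k : Nat) (c : List Char) :
    (List.replicate k c).flatten.length = k * c.length := by
  induction k with
  | zero => simp
  | succ k ih => simp [List.replicate_succ, ih]; ring

theorem chunkWrap_cons (d : Nat) (a : Char) (as : List Char) :
    chunkWrap (d+1) (a :: as) =
      List.take (d+1) (a :: as) :: chunkWrap (d+1) (List.drop (d+1) (a :: as)) := by
  rw [chunkWrap]

theorem chunkWrap_nil_iff (d : Nat) (s : List Char) : chunkWrap d s = [] ↔ s = [] := by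
  cases s with
  | nil => simp [chunkWrap]
  | cons c cs => cases d <;> simp [chunkWrap]

theorem chunk_all_eq (d : Nat) (c : List Char) (hc : c.length = d + 1) (s : List Char) :
    ((chunkWrap (d+1) s).all (fun y => y == c) = true ↔ ∃ k, s = (List.replicate k c).flatten) := by
  generalize hn : s.length = n
  induction n using Nat.strong_induction_on generalizing s with
  | _ n ih =>
  cases s with
  | nil =>
    simp only [chunkWrap, List.all_nil, true_iff]
    exact ⟨0, by simp⟩
  | cons a as =>
    rw [chunkWrap_cons]
    rw [List.all_cons, Bool.and_eq_true, beq_iff_eq]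
    constructor
    · rintro ⟨htake, hrest⟩
      have hlen : d + 1 ≤ (a :: as).length := by
        have := congrArg List.length htake
        simp [hc] at this ⊢
        omega
      obtain ⟨k, hk⟩ := (ih ((a :: as).length - (d+1)) (by simp at hn ⊢; omega)
        (List.drop (d+1) (a :: as)) (by simp)).mp hrest
      refine ⟨k + 1, ?_⟩
      rw [List.replicate_succ, List.flatten_cons, ← hk, ← htake, List.take_append_drop]
    · rintro ⟨k, hk⟩
      cases k with
      | zero => simp at hk
      | succ k =>
        rw [List.replicate_succ, List.flatten_cons] at hk
        have htake : List.take (d+1) (a :: as) = c := by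
          rw [hk, ← hc, List.take_left]
        have hdrop : List.drop (d+1) (a :: as) = (List.replicate k c).flatten := by
          rw [hk, ← hc, List.drop_left]
        refine ⟨htake, ?_⟩
        refine (ih ((a :: as).length - (d+1)) (by simp at hn ⊢; omega)
          (List.drop (d+1) (a :: as)) (by simp)).mpr ⟨k, hdrop⟩

theorem chunk_cond_iff (d : Nat) (s : List Char) :
    ((decide (1 < (chunkWrap (d+1) s).length) &&
      (chunkWrap (d+1) s).tail.all (fun y => y == (chunkWrap (d+1) s).headD [])) = true
      ↔ isRep s (d+1)) := by
  cases s with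
  | nil =>
    simp [chunkWrap, isRep]
  | cons a as =>
    rw [chunkWrap_cons, Bool.and_eq_true, decide_eq_true_iff]
    simp only [List.length_cons, List.tail_cons, List.headD_cons]
    obtain ⟨C, hC⟩ : ∃ C, List.take (d+1) (a :: as) = C := ⟨_, rfl⟩
    rw [hC]
    constructor
    · rintro ⟨hlen, hall⟩
      have hrest : chunkWrap (d+1) (List.drop (d+1) (a :: as)) ≠ [] := by
        intro h0; rw [h0] at hlen; simp at hlen
      have hdlt : d + 1 < (a :: as).length := by
        have h1 : List.drop (d+1) (a :: as) ≠ [] :=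
          fun h0 => hrest ((chunkWrap_nil_iff _ _).mpr h0)
        have h2 := List.drop_eq_nil_iff.not.mp h1
        omega
      have hc : C.length = d + 1 := by rw [← hC]; simp; simp at hdlt; omega
      obtain ⟨k, hk⟩ := (chunk_all_eq d C hc _).mp hall
      have hkpos : 0 < k := by
        by_contra h0
        have hz : k = 0 := by omega
        subst hz
        simp only [List.replicate, List.flatten_nil] at hk
        have := List.drop_eq_nil_iff.mp hk
        omega
      have hs : (a :: as) = (List.replicate (k+1) C).flatten := by
        rw [List.replicate_succ, List.flatten_cons, ← hk, ← hC, List.take_append_drop]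
      have hlen' : (a :: as).length = (k+1) * (d+1) := by
        conv_lhs => rw [hs]
        rw [flatten_replicate_length, hc]
      refine ⟨by omega, hdlt, ⟨k+1, by rw [hlen', Nat.mul_comm]⟩, ?_⟩
      rw [hlen', Nat.mul_div_cancel _ (by omega), hC]
      exact hs
    · rintro ⟨-, hdlt, hdvd, hpow⟩
      rw [hC] at hpow
      have hc : C.length = d + 1 := by rw [← hC]; simp; simp at hdlt; omega
      obtain ⟨k, hk⟩ := hdvd
      have hk2 : 2 ≤ k := by
        rcases k with _ | _ | k
        · rw [Nat.mul_zero] at hk; simp at hk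
        · rw [Nat.mul_one] at hk; omega
        · omega
      have hdiv : (a :: as).length / (d+1) = k := by
        rw [hk, Nat.mul_div_cancel_left _ (by omega)]
      rw [hdiv] at hpow
      obtain ⟨k', rfl⟩ : ∃ k', k = k' + 1 := ⟨k - 1, by omega⟩
      have hdrop : List.drop (d+1) (a :: as) = (List.replicate k' C).flatten := by
        nth_rewrite 1 [hpow]
        rw [List.replicate_succ, List.flatten_cons, ← hc, List.drop_left]
      constructor
      · have hne : chunkWrap (d+1) (List.drop (d+1) (a :: as)) ≠ [] := by
          rw [Ne, chunkWrap_nil_iff, List.drop_eq_nil_iff]; omega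
        cases h0 : chunkWrap (d+1) (List.drop (d+1) (a :: as)) with
        | nil => exact absurd h0 hne
        | cons _ _ => simp
      · exact (chunk_all_eq d C hc _).mpr ⟨k', hdrop⟩

theorem isRep_rotate {s : List Char} {d : Nat} (h : isRep s d) : s.rotate d = s := by
  obtain ⟨hd0, hdn, hdvd, hpow⟩ := h
  obtain ⟨c, hC⟩ : ∃ c, List.take d s = c := ⟨_, rfl⟩
  have hclen : c.length = d := by rw [← hC]; simp; omega
  rw [hC] at hpow
  obtain ⟨k, hk⟩ : ∃ k, s.length / d = k + 1 := by
    have h1 : 1 ≤ s.length / d := (Nat.one_le_div_iff hd0).mpr (by omega)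
    exact ⟨s.length / d - 1, by omega⟩
  rw [hk] at hpow
  have hdrop : List.drop d s = (List.replicate k c).flatten := by
    nth_rewrite 1 [hpow]
    rw [List.replicate_succ, List.flatten_cons, ← hclen, List.drop_left]
  rw [List.rotate_eq_drop_append_take (by omega), hC, hdrop, hpow,
    List.replicate_succ', List.flatten_append]
  simp

theorem pow_of_rotate : ∀ (k : Nat) (g : Nat) (s : List Char), 0 < g → s.length = k * g →
    s.rotate g = s → s = (List.replicate k (s.take g)).flatten := by
  intro k
  induction k with
  | zero =>
    intro g s _ hlen _
    have : s = [] := List.eq_nil_of_length_eq_zero (by omega)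
    simp [this]
  | succ k ih =>
    intro g s hg hlen hrot
    have hmul : s.length = k * g + g := by rw [hlen, Nat.succ_mul]
    rcases Nat.eq_zero_or_pos k with hk0 | hkpos
    · subst hk0
      rw [List.take_of_length_le (by omega)]
      simp
    · have hkg : g ≤ k * g := by
        calc g = 1 * g := (Nat.one_mul g).symm
          _ ≤ k * g := Nat.mul_le_mul_right g hkpos
      obtain ⟨c, hC⟩ : ∃ c, List.take g s = c := ⟨_, rfl⟩
      obtain ⟨t, hT⟩ : ∃ t, List.drop g s = t := ⟨_, rfl⟩
      have hclen : c.length = g := by rw [← hC]; simp; omega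
      have htlen : t.length = k * g := by rw [← hT]; simp; omega
      have hgt : g ≤ t.length := by omega
      have hst : s = c ++ t := by rw [← hC, ← hT, List.take_append_drop]
      have hcomm : t ++ c = c ++ t := by
        have h1 := List.rotate_eq_drop_append_take (show g ≤ s.length by omega)
        rw [hrot, hC, hT] at h1
        rw [← h1, ← hst]
      have htake : t.take g = c := by
        have h2 := congrArg (List.take g) hcomm
        rw [List.take_append_of_le_length hgt] at h2
        conv at h2 => rhs; rw [← hclen]
        rw [List.take_left] at h2
        exact h2
      have hdropt : t.drop g ++ c = t := by
        have h3 := congrArg (List.drop g) hcomm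
        rw [List.drop_append_of_le_length hgt] at h3
        conv at h3 => rhs; rw [← hclen]
        rw [List.drop_left] at h3
        exact h3
      have hrott : t.rotate g = t := by
        rw [List.rotate_eq_drop_append_take hgt, htake, hdropt]
      have hpow := ih g t hg htlen hrott
      rw [htake] at hpow
      rw [hC]
      calc s = c ++ t := hst
        _ = c ++ (List.replicate k c).flatten := by rw [← hpow]
        _ = (List.replicate (k+1) c).flatten := by rw [List.replicate_succ, List.flatten_cons]

theorem rotate_mul {s : List Char} {j : Nat} (h : s.rotate j = s) :
    ∀ m : Nat, s.rotate (j * m) = s := by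
  intro m
  induction m with
  | zero => simp
  | succ m ih => rw [Nat.mul_succ, ← List.rotate_rotate, ih, h]

theorem rotate_gcd {s : List Char} {j : Nat} (hj0 : 0 < j) (hjn : j < s.length)
    (h : s.rotate j = s) : isRep s (j.gcd s.length) := by
  have hg0 : 0 < j.gcd s.length := Nat.gcd_pos_of_pos_left _ hj0
  have hgj : j.gcd s.length ≤ j := Nat.gcd_le_left _ hj0
  have hgn : j.gcd s.length < s.length := lt_of_le_of_lt hgj hjn
  have hdvd : j.gcd s.length ∣ s.length := Nat.gcd_dvd_right _ _
  obtain ⟨m, hm, hmod⟩ := Nat.exists_mul_mod_eq_gcd (k := s.length) (n := j) hgn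
  have h2 : s.rotate (j.gcd s.length) = s := by
    rw [← hmod, List.rotate_mod]
    exact rotate_mul h m
  exact ⟨hg0, hgn, hdvd, pow_of_rotate _ _ s hg0 (Nat.div_mul_cancel hdvd).symm h2⟩

theorem prefix_of_rotate {s : List Char} {j : Nat} (hj : j ≤ s.length) (h : s.rotate j = s) :
    s <+: s.drop j ++ s := by
  conv_lhs => rw [← h, List.rotate_eq_drop_append_take hj]
  exact (List.prefix_append_right_inj _).mpr (List.take_prefix _ _)

theorem rotate_of_prefix {s : List Char} {j : Nat} (hj : j ≤ s.length)
    (h : s <+: s.drop j ++ s) : s.rotate j = s := by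
  rw [List.rotate_eq_drop_append_take hj]
  have h2 : s.drop j ++ s.take j <+: s.drop j ++ s :=
    (List.prefix_append_right_inj _).mpr (List.take_prefix _ _)
  rw [List.prefix_iff_eq_take] at h h2
  have hlen : (s.drop j ++ s.take j).length = s.length := by
    simp; omega
  rw [hlen] at h2
  exact h2.trans h.symm

theorem B_iff {s : List Char} (hs : s ≠ []) :
    (PySem.Chars.isIn s (PySem.List.slice (s ++ s) (some 1) (some (-1))) = true
      ↔ ∃ j, 0 < j ∧ j < s.length ∧ s.rotate j = s) := by
  have hn : 0 < s.length := List.length_pos_iff.mpr hs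
  have hslice : PySem.List.slice (s ++ s) (some 1) (some (-1))
      = List.take (s.length + s.length - 2) (List.drop 1 (s ++ s)) := by
    simp only [PySem.List.slice, PySem.List.clampIdx, List.length_append]
    have h2 : ¬ ((s.length + s.length : Int) + (-1) < 0) := by omega
    norm_num [h2]
    congr 1
    · omega
    · rw [show min 1 (s.length + s.length) = 1 from by omega, List.drop_one]
  rw [← PySem.Chars.exists_prefix_drop_iff_isIn, hslice]
  constructor
  · rintro ⟨i, hpre⟩
    rw [List.drop_take, List.drop_drop, List.prefix_take_iff] at hpre
    obtain ⟨hpre1, hlen2⟩ := hpre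
    have hji : 1 + i < s.length := by omega
    rw [List.drop_append_of_le_length (by omega)] at hpre1
    exact ⟨1 + i, by omega, hji, rotate_of_prefix (by omega) hpre1⟩
  · rintro ⟨j, hj0, hjn, hrot⟩
    refine ⟨j - 1, ?_⟩
    rw [List.drop_take, List.drop_drop, List.prefix_take_iff]
    have hj1 : 1 + (j - 1) = j := by omega
    rw [hj1]
    constructor
    · rw [List.drop_append_of_le_length (by omega)]
      exact prefix_of_rotate (by omega) hrot
    · omega

theorem A_iff (s : List Char) :
    ((PySem.List.pyRange 1 (((s.length / 2 : Nat) : Int) + 2)).any (fun n =>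
        let splits := chunkWrap n.toNat s
        decide (1 < splits.length) &&
          (PySem.List.slice splits (some 1) none).all (fun y => y == splits.headD [])) = true
      ↔ ∃ d, isRep s d) := by
  rw [List.any_eq_true]
  constructor
  · rintro ⟨nI, hmem, hf⟩
    rw [PySem.List.mem_pyRange_one] at hmem
    obtain ⟨d, hd⟩ : ∃ d, nI.toNat = d + 1 := ⟨nI.toNat - 1, by omega⟩
    simp only [PySem.List.slice_from_one, hd] at hf
    exact ⟨d + 1, (chunk_cond_iff d s).mp hf⟩
  · rintro ⟨d, hrep⟩
    have hd0 := hrep.1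
    have hdn := hrep.2.1
    obtain ⟨k, hk⟩ := hrep.2.2.1
    have hk2 : 2 ≤ k := by
      rcases k with _ | _ | k
      · rw [Nat.mul_zero] at hk; omega
      · rw [Nat.mul_one] at hk; omega
      · omega
    have hd2 : d ≤ s.length / 2 := by
      rw [Nat.le_div_iff_mul_le (by omega), hk]
      exact Nat.mul_le_mul_left d hk2
    obtain ⟨d', rfl⟩ : ∃ d', d = d' + 1 := ⟨d - 1, by omega⟩
    refine ⟨((d' + 1 : Nat) : Int), ?_, ?_⟩
    · rw [PySem.List.mem_pyRange_one]
      constructor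
      · exact_mod_cast Nat.one_le_iff_ne_zero.mpr (by omega)
      · push_cast
        omega
    · simp only [PySem.List.slice_from_one, Int.toNat_natCast]
      exact (chunk_cond_iff d' s).mpr hrep

theorem toDigitsCore_len_ge : ∀ (fuel n : Nat) (ds : List Char),
    ds.length ≤ (Nat.toDigitsCore 10 fuel n ds).length := by
  intro fuel
  induction fuel with
  | zero => simp [Nat.toDigitsCore]
  | succ f ih =>
    intro n ds
    simp only [Nat.toDigitsCore]
    split
    · simp
    · exact le_trans (by simp) (ih _ _)

theorem toChars_ne_nil (x : Int) : PySem.Int.toChars x ≠ [] := by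
  unfold PySem.Int.toChars
  split
  · simp
  · have h1 : 1 ≤ (Nat.toDigits 10 x.toNat).length := by
      show 1 ≤ (Nat.toDigitsCore 10 (x.toNat + 1) x.toNat []).length
      simp only [Nat.toDigitsCore]
      split
      · simp
      · exact le_trans (by simp) (toDigitsCore_len_ge _ _ _)
    intro h0
    rw [h0] at h1
    simp at h1

theorem cond_eq (x : Int) :
    ((PySem.List.pyRange 1 ((((PySem.Int.toChars x).length / 2 : Nat) : Int) + 2)).any (fun n =>
        let splits := chunkWrap n.toNat (PySem.Int.toChars x)
        decide (1 < splits.length) &&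
          (PySem.List.slice splits (some 1) none).all (fun y => y == splits.headD []))
      = PySem.Chars.isIn (PySem.Int.toChars x)
          (PySem.List.slice (PySem.Int.toChars x ++ PySem.Int.toChars x) (some 1) (some (-1)))) := by
  rw [Bool.eq_iff_iff, A_iff, B_iff (toChars_ne_nil x)]
  constructor
  · rintro ⟨d, hrep⟩
    exact ⟨d, hrep.1, hrep.2.1, isRep_rotate hrep⟩
  · rintro ⟨j, hj0, hjn, hrot⟩
    exact ⟨_, rotate_gcd hj0 hjn hrot⟩

-- ===== VERDICT (by name: the statement is the Claim_ definition above) =====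
theorem get_valid_spec : Claim_equal_get_valid := by
  intro from_ to_ _
  unfold Spec_get_valid get_valid get_valid_alt
  apply PySem.List.foldl_congr_mem
  intro acc x _
  simp only [cond_eq x]
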